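-- pv_equiv track=rewrite | github.com/krwhynot/crispy-crm | data/migration-output/name-cleanup/name_cleanup_script.py | parse_title_single_name
-- ===== SOURCE A (Python) =====
-- from typing import Tuple, Optional, Dict, List
--
-- JOB_TITLES = {
--     'president', 'vice president', 'vp', 'ceo', 'cfo', 'coo',
--     'general manager', 'gm', 'manager', 'executive', 'director',
--     'owner', 'chef', 'executive chef', 'pastry chef', 'corporate chef',
--     'sous chef', 'chef de cuisine', 'coordinator', 'assistant',
--     'supervisor', 'administrator'
-- }
--
-- def is_job_title_keyword(word: str) -> bool:
--     """Check if word is a known job title"""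
--     return word.lower() in JOB_TITLES
--
-- def parse_title_single_name(name: str) -> Tuple[Optional[str], Optional[str], str]:
--     """Parse 'Executive Chef Smith' or 'General Manager Jensen'"""
--     words = name.split()
--
--     # Find where title ends and name begins
--     title_words = []
--     name_word = None
--
--     for i, word in enumerate(words):
--         if is_job_title_keyword(word):
--             title_words.append(word)
--         elif word.lower() in ['chef', 'manager', 'director', 'executive']:
--             title_words.append(word)
--         else:
--             # This should be the name
--             name_word = word
--             # Add any remaining words to title if they're title-like
--             for j in range(i+1, len(words)):
--                 if is_job_title_keyword(words[j]):
--                     title_words.append(words[j])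
--             break
--
--     title = ' '.join(title_words).title() if title_words else name
--
--     return None, name_word, title
-- ===== SOURCE B (Python) =====
-- from typing import Tuple, Optional
--
-- JOB_TITLES = {
--     'president', 'vice president', 'vp', 'ceo', 'cfo', 'coo',
--     'general manager', 'gm', 'manager', 'executive', 'director',
--     'owner', 'chef', 'executive chef', 'pastry chef', 'corporate chef',
--     'sous chef', 'chef de cuisine', 'coordinator', 'assistant',
--     'supervisor', 'administrator'
-- }
--
-- def is_job_title_keyword(word: str) -> bool:
--     return word.lower() in JOB_TITLES
--
-- def parse_title_single_name(name: str) -> Tuple[Optional[str], Optional[str], str]: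
--     """Two independent passes: the title is every keyword word, the name is the
--     first non-keyword word."""
--     words = name.split()
--     title_words = [w for w in words if is_job_title_keyword(w)]
--     name_word = next((w for w in words if not is_job_title_keyword(w)), None)
--     title = ' '.join(title_words).title() if title_words else name
--     return None, name_word, title
-- ===== Notes on version B (the rewrite author's own statement) =====
-- stated objective: simpler
-- what changed: Replaced the indexed break-loop with its nested trailing-word scan by two independent passes: title_words is the list of all keyword words and name_word is the first non-keyword word.
import Mathlib
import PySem

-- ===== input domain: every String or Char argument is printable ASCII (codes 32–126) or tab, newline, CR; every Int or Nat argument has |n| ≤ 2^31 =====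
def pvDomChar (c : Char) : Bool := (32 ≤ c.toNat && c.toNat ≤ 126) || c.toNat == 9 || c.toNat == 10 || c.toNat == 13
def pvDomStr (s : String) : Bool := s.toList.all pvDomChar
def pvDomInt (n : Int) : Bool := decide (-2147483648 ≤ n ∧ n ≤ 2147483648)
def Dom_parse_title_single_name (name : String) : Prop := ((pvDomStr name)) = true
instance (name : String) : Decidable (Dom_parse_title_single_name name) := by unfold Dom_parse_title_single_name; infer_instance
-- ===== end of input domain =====

-- B replaces A's break-loop with nested trailing scan by two independent passes (all keyword words / first non-keyword word); objective: simpler.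

-- ===== PORT A =====
-- module constant JOB_TITLES (a Python set literal)
def JOB_TITLES : PySem.Set String := PySem.Set.ofList
  ["president", "vice president", "vp", "ceo", "cfo", "coo",
   "general manager", "gm", "manager", "executive", "director",
   "owner", "chef", "executive chef", "pastry chef", "corporate chef",
   "sous chef", "chef de cuisine", "coordinator", "assistant",
   "supervisor", "administrator"]

-- module helper is_job_title_keyword (used by both A and B)
def is_job_title_keyword (word : String) : Bool :=
  PySem.Set.contains JOB_TITLES (PySem.Str.lower word)

-- str.title() is not in PySem: hand port, exact on ASCII (uppercase a letter not
-- preceded by a letter, lowercase a letter preceded by one, leave other chars)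
def pyTitleGo : Bool → List Char → List Char
  | _, [] => []
  | prev, c :: cs =>
      (if PySem.Chars.isalpha c then
         (if prev then PySem.Chars.lowerChar c else PySem.Chars.upperChar c)
       else c) :: pyTitleGo (PySem.Chars.isalpha c) cs

def pyTitle (s : String) : String := String.ofList (pyTitleGo false s.toList)

-- inner loop: "for j in range(i+1, len(words)): if is_job_title_keyword(words[j]): title_words.append(words[j])"
def loopA_trailing : List String → List String
  | [] => []
  | w :: ws => if is_job_title_keyword w then w :: loopA_trailing ws else loopA_trailing ws

-- outer loop with break, returning (title_words, name_word)
def loopA : List String → List String × Option String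
  | [] => ([], none)
  | w :: ws =>
      if is_job_title_keyword w then
        let r := loopA ws; (w :: r.1, r.2)
      else if (PySem.Str.lower w == "chef" || PySem.Str.lower w == "manager"
               || PySem.Str.lower w == "director" || PySem.Str.lower w == "executive") then
        let r := loopA ws; (w :: r.1, r.2)
      else
        (loopA_trailing ws, some w)

def parse_title_single_name (name : String) : Option String × Option String × String :=
  let words := PySem.Str.split₀ name
  let r := loopA words
  let title := if r.1.isEmpty then name else pyTitle (PySem.Str.join " " r.1)
  (none, r.2, title)

-- ===== PORT B =====
def parse_title_single_name_alt (name : String) : Option String × Option String × String :=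
  let words := PySem.Str.split₀ name
  let title_words := words.filter (fun w => is_job_title_keyword w)
  let name_word := words.find? (fun w => !is_job_title_keyword w)
  let title := if title_words.isEmpty then name else pyTitle (PySem.Str.join " " title_words)
  (none, name_word, title)

-- ===== PRECONDITION & SPEC =====
def Spec_parse_title_single_name (name : String) (out : Option String × Option String × String) : Prop := out = parse_title_single_name_alt name
instance (name : String) (out : Option String × Option String × String) : Decidable (Spec_parse_title_single_name name out) := by unfold Spec_parse_title_single_name; infer_instance

-- ===== CLAIM (what is proved, stated in full; the proofs are below) =====
def Claim_equal_parse_title_single_name : Prop := ∀ (name : String), Dom_parse_title_single_name name → Spec_parse_title_single_name name (parse_title_single_name name)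

-- ===== LEMMAS AND PROOFS =====

-- A's elif branch is subsumed by the keyword test: those four words are in JOB_TITLES
theorem elif_imp_kw (w : String)
    (h : (PySem.Str.lower w == "chef" || PySem.Str.lower w == "manager"
          || PySem.Str.lower w == "director" || PySem.Str.lower w == "executive") = true) :
    is_job_title_keyword w = true := by
  simp only [Bool.or_eq_true, beq_iff_eq] at h
  unfold is_job_title_keyword
  rcases h with ((h | h) | h) | h <;> rw [h] <;> decide

theorem loopA_trailing_eq_filter (ws : List String) :
    loopA_trailing ws = ws.filter (fun w => is_job_title_keyword w) := by
  induction ws with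
  | nil => rfl
  | cons w ws ih =>
      by_cases h : is_job_title_keyword w = true <;>
        simp [loopA_trailing, h, ih]

theorem loopA_eq (ws : List String) :
    loopA ws = (ws.filter (fun w => is_job_title_keyword w),
                ws.find? (fun w => !is_job_title_keyword w)) := by
  induction ws with
  | nil => rfl
  | cons w ws ih =>
      by_cases h : is_job_title_keyword w = true
      · simp [loopA, h, List.find?, ih]
      · have he : (PySem.Str.lower w == "chef" || PySem.Str.lower w == "manager"
            || PySem.Str.lower w == "director" || PySem.Str.lower w == "executive") = false := by
          cases hb : (PySem.Str.lower w == "chef" || PySem.Str.lower w == "manager"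
            || PySem.Str.lower w == "director" || PySem.Str.lower w == "executive")
          · rfl
          · exact absurd (elif_imp_kw w hb) h
        simp [loopA, h, he, List.find?, loopA_trailing_eq_filter]

-- ===== VERDICT (by name: the statement is the Claim_ definition above) =====
theorem parse_title_single_name_spec : Claim_equal_parse_title_single_name := by
  intro name _
  simp only [Spec_parse_title_single_name, parse_title_single_name,
    parse_title_single_name_alt, loopA_eq]
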